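-- pv_equiv track=rewrite | github.com/Im-sy/Algorithm | Programmers/크레인인형뽑기게임.py | solution
-- ===== SOURCE A (Python) =====
-- from collections import deque
--
-- def solution(board, moves):
--     answer = 0
--     trans_board = [deque([row[i] for row in board if row[i] != 0]) for i in range(len(board[0]))]
--     result = []
--     for move in moves:
--         if trans_board[move-1]:
--             doll = trans_board[move-1].popleft()
--             if result:
--                 if result[-1] == doll:
--                     result.pop()
--                     answer += 2
--                 else:
--                     result.append(doll)
--             else:
--                 result.append(doll)
--     return answer
-- ===== SOURCE B (Python) =====
-- def solution(board, moves):
--     cols = len(board[0])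
--     positions = [[] for _ in range(cols)]   # column -> where in moves it is played
--     for j, m in enumerate(moves):
--         positions[m - 1].append(j)
--     picks = [None] * len(moves)
--     for c in range(cols):
--         column = [row[c] for row in board if row[c] != 0]
--         for j, doll in zip(positions[c], column):
--             picks[j] = doll
--     stack = []
--     answer = 0
--     for doll in picks:
--         if doll is not None:
--             if stack and stack[-1] == doll:
--                 stack.pop()
--                 answer += 2
--             else:
--                 stack.append(doll)
--     return answer
-- ===== Notes on version B (the rewrite author's own statement) =====
-- stated objective: alternative
-- what changed: B replaces A's online simulation against mutable per-column deques by an offline plan: it first groups the move indices by the column they address, then fills a picks array by zipping each column's queued move positions with that column's nonzero cells top-down, and only then runs the stack-matching as a single separate pass over picks; Pre_ excludes exactly the inputs where A raises (empty board, a row shorter than the first row, a move index outside Python's index range for the columns).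
import Mathlib
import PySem

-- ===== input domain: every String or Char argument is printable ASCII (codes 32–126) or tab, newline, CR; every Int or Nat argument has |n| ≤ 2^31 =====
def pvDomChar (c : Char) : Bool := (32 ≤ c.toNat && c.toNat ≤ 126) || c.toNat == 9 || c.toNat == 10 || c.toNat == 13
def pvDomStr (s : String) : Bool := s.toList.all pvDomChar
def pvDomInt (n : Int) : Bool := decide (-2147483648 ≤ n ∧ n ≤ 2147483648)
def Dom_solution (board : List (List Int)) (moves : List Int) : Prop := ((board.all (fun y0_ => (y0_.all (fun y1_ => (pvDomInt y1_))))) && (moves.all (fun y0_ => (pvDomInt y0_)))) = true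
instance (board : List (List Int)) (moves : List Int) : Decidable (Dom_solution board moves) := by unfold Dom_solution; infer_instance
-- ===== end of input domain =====

-- B replaces A's online simulation against mutable per-column deques by an offline plan:
-- group move indices by column, scatter each column's dolls into a picks array by zipping,
-- then stack-match picks in one separate pass (objective: alternative).

-- ===== PORT A =====
-- one iteration of A's 'for move in moves' loop over the state (trans_board, result, answer)
def stepA (st : List (List Int) × List Int × Int) (move : Int) : List (List Int) × List Int × Int :=
  match PySem.List.pyGetD st.1 (move - 1) [] with
  | [] => st
  | doll :: rest =>                                   -- popleft
    let tb' := PySem.List.pySetD st.1 (move - 1) rest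
    match st.2.1.getLast? with                        -- result[-1] (if result nonempty)
    | some last =>
      if last = doll then (tb', st.2.1.dropLast, st.2.2 + 2)
      else (tb', st.2.1 ++ [doll], st.2.2)
    | none => (tb', st.2.1 ++ [doll], st.2.2)

def solution (board : List (List Int)) (moves : List Int) : Int :=
  let ncols := (PySem.List.pyGetD board 0 []).length
  let trans := (List.range ncols).map (fun (i : Nat) =>
    board.filterMap (fun row =>
      let v := PySem.List.pyGetD row (i : Int) 0
      if v ≠ 0 then some v else none))
  (moves.foldl stepA (trans, ([] : List Int), (0 : Int))).2.2

-- ===== PORT B =====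
-- Source B's '[row[c] for row in board if row[c] != 0]'
def colN (board : List (List Int)) (c : Int) : List Int :=
  board.filterMap (fun row =>
    let v := PySem.List.pyGetD row c 0
    if v ≠ 0 then some v else none)

-- the body of Source B's final 'for doll in picks' loop (skip None, stack-match otherwise)
def stackStepB (st : List Int × Int) (o : Option Int) : List Int × Int :=
  match o with
  | none => st
  | some doll =>
    if st.1.getLast? = some doll then (st.1.dropLast, st.2 + 2)
    else (st.1 ++ [doll], st.2)

def solution_alt (board : List (List Int)) (moves : List Int) : Int :=
  let cols := (PySem.List.pyGetD board 0 []).length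
  -- positions = [[] for _ in range(cols)]
  let positions0 : List (List Int) := (List.range cols).map (fun _ => [])
  -- for j, m in enumerate(moves): positions[m - 1].append(j)
  let positions := (PySem.List.enumerate moves 0).foldl
    (fun ps jm => PySem.List.pySetD ps (jm.2 - 1) (PySem.List.pyGetD ps (jm.2 - 1) [] ++ [jm.1]))
    positions0
  -- picks = [None]*len(moves); for c in range(cols): for j, doll in zip(positions[c], column): picks[j] = doll
  let picks := (PySem.List.pyRange 0 (cols : Int) 1).foldl (fun pk c =>
      ((PySem.List.pyGetD positions c []).zip (colN board c)).foldl
        (fun pk jd => PySem.List.pySetD pk jd.1 (some jd.2)) pk)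
    (List.replicate moves.length (none : Option Int))
  -- stack = []; answer = 0; for doll in picks: …
  (picks.foldl stackStepB (([] : List Int), (0 : Int))).2

-- ===== PRECONDITION & SPEC =====
-- Pre_ excludes exactly the inputs where the Python A raises: an empty board (board[0]),
-- a row shorter than the first row (row[i] in the transposition), and a move whose index
-- move-1 is outside Python's index range for the columns (IndexError on trans_board[move-1]).
def Pre_solution (board : List (List Int)) (moves : List Int) : Prop :=
  board ≠ [] ∧
  (∀ row ∈ board, (board.headD []).length ≤ row.length) ∧
  (∀ m ∈ moves, PySem.Raise.InRange (board.headD []).length (m - 1))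
instance (board : List (List Int)) (moves : List Int) : Decidable (Pre_solution board moves) := by
  unfold Pre_solution; infer_instance

def pvWitness_solution : List (List Int) × List Int :=
  ([[0, 0, 0, 0, 0], [0, 0, 1, 0, 3], [0, 2, 5, 0, 1], [4, 2, 4, 4, 2], [3, 5, 1, 3, 1]],
   [1, 5, 3, 5, 1, 2, 1, 4])

def Spec_solution (board : List (List Int)) (moves : List Int) (out : Int) : Prop := out = solution_alt board moves
instance (board : List (List Int)) (moves : List Int) (out : Int) : Decidable (Spec_solution board moves out) := by unfold Spec_solution; infer_instance

-- ===== CLAIM (what is proved, stated in full; the proofs are below) =====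
def Claim_equal_solution : Prop := ∀ (board : List (List Int)) (moves : List Int), Dom_solution board moves → Pre_solution board moves → Spec_solution board moves (solution board moves)

-- ===== LEMMAS AND PROOFS =====

-- the effective (0-based) column a move addresses, Python-index style
def effI (cols : Nat) (m : Int) : Int := PySem.Int.mod (m - 1) (cols : Int)

-- a Python index in range resolves to (i mod len)
theorem pyIdx_mod (n : Nat) (i : Int) (h : PySem.Raise.InRange n i) :
    PySem.List.pyIdx? n i = some (PySem.Int.mod i n).toNat := by
  obtain ⟨h1, h2⟩ := h
  have hn : (0:Int) < n := by omega
  rw [PySem.Int.mod_eq_emod_of_pos hn]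
  unfold PySem.List.pyIdx?
  by_cases h0 : 0 ≤ i
  · rw [if_pos h0, if_pos h2, Int.emod_eq_of_lt h0 h2]
  · rw [if_neg h0, if_pos h1]
    have hm : i % (n:Int) = i + n := by
      have hself := Int.add_mul_emod_self_left (a := i) (b := (n:Int)) (c := 1)
      rw [mul_one] at hself
      rw [← hself, Int.emod_eq_of_lt (by omega) (by omega)]
    rw [hm]; congr 1; omega

theorem pyGetD_mod {α : Type} (xs : List α) (i : Int) (d : α)
    (h : PySem.Raise.InRange xs.length i) :
    PySem.List.pyGetD xs i d = xs.getD (PySem.Int.mod i xs.length).toNat d := by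
  simp [PySem.List.pyGetD, PySem.List.pyGet?, pyIdx_mod _ _ h, List.getD]

theorem pySetD_mod {α : Type} (xs : List α) (i : Int) (v : α)
    (h : PySem.Raise.InRange xs.length i) :
    PySem.List.pySetD xs i v = xs.set (PySem.Int.mod i xs.length).toNat v := by
  simp [PySem.List.pySetD, PySem.List.pySet?, pyIdx_mod _ _ h]

-- the doll the j-th move picks, if any: the (number of earlier moves to the same
-- effective column)-th nonzero cell of that column
def targetAt (board : List (List Int)) (cols : Nat) (moves : List Int) (j : Nat) : Option Int :=
  match moves[j]? with
  | none => none
  | some m =>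
    (colN board (effI cols m))[(moves.take j).countP (fun x => effI cols x == effI cols m)]?

def specPicks (board : List (List Int)) (cols : Nat) (moves : List Int) : List (Option Int) :=
  (List.range moves.length).map (targetAt board cols moves)

-- ---- A side: the fold over moves is the stack scan of the picked dolls ----

-- the picks of the remaining moves, given how many dolls each column has already lost
def picksW (board : List (List Int)) (cols : Nat) (cnt : Int → Nat) : List Int → List (Option Int)
  | [] => []
  | m :: ms =>
    (colN board (effI cols m))[cnt (effI cols m)]? ::
      picksW board cols
        (fun e => if e = effI cols m then cnt (effI cols m) + 1 else cnt e) ms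

theorem A_fold (board : List (List Int)) (cols : Nat) :
    ∀ (ms : List Int) (trans : List (List Int)) (res : List Int) (ans : Int) (cnt : Int → Nat),
      trans.length = cols →
      (∀ m ∈ ms, PySem.Raise.InRange cols (m - 1)) →
      (∀ c : Nat, c < cols → trans.getD c [] = (colN board (c : Int)).drop (cnt (c : Int))) →
      (ms.foldl stepA (trans, res, ans)).2 = (picksW board cols cnt ms).foldl stackStepB (res, ans) := by
  intro ms
  induction ms with
  | nil => intro trans res ans cnt _ _ _; simp [picksW]
  | cons m ms ih =>
    intro trans res ans cnt hlen hmv hinv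
    have hmr := hmv m List.mem_cons_self
    have hcols0 : 0 < cols := by obtain ⟨h1, h2⟩ := hmr; omega
    have he0 : 0 ≤ effI cols m := PySem.Int.mod_nonneg _ (by exact_mod_cast hcols0)
    have helt : effI cols m < (cols : Int) := PySem.Int.mod_lt _ (by exact_mod_cast hcols0)
    have hclt : (effI cols m).toNat < cols := by omega
    have hcast : (((effI cols m).toNat : Nat) : Int) = effI cols m := by omega
    have hget : PySem.List.pyGetD trans (m - 1) [] = trans.getD (effI cols m).toNat [] := by
      rw [pyGetD_mod _ _ _ (by rw [hlen]; exact hmr), hlen]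
      rfl
    have hinvc : trans.getD (effI cols m).toNat [] =
        (colN board (effI cols m)).drop (cnt (effI cols m)) := by
      have := hinv (effI cols m).toNat hclt
      rwa [hcast] at this
    have hmvtail : ∀ x ∈ ms, PySem.Raise.InRange cols (x - 1) :=
      fun x hx => hmv x (List.mem_cons_of_mem _ hx)
    simp only [List.foldl_cons, picksW]
    cases hdrop : (colN board (effI cols m)).drop (cnt (effI cols m)) with
    | nil =>
      have hnone : (colN board (effI cols m))[cnt (effI cols m)]? = none := by
        have := List.drop_eq_nil_iff.mp hdrop
        exact List.getElem?_eq_none (by omega)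
      have hpg : PySem.List.pyGetD trans (m - 1) [] = [] := by rw [hget, hinvc, hdrop]
      have hstep : stepA (trans, res, ans) m = (trans, res, ans) := by
        unfold stepA
        simp only [hpg]
      rw [hstep, hnone]
      have hbody : stackStepB (res, ans) none = (res, ans) := rfl
      rw [hbody]
      apply ih trans res ans _ hlen hmvtail
      intro c hcl
      by_cases hcm : (c : Int) = effI cols m
      · rw [hcm]
        have hcc : c = (effI cols m).toNat := by omega
        rw [if_pos rfl, hcc, hinvc, hdrop]
        have := List.drop_eq_nil_iff.mp hdrop
        exact (List.drop_eq_nil_iff.mpr (by omega)).symm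
      · rw [if_neg hcm]
        exact hinv c hcl
    | cons doll rest =>
      have hlt : cnt (effI cols m) < (colN board (effI cols m)).length := by
        by_contra hcon
        rw [List.drop_eq_nil_iff.mpr (by omega)] at hdrop
        cases hdrop
      have hcons := List.drop_eq_getElem_cons hlt
      rw [hdrop, List.cons.injEq] at hcons
      obtain ⟨hdoll, hrest⟩ := hcons
      have hsome : (colN board (effI cols m))[cnt (effI cols m)]? = some doll := by
        rw [List.getElem?_eq_getElem hlt, hdoll]
      have hset : PySem.List.pySetD trans (m - 1) rest = trans.set (effI cols m).toNat rest := by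
        rw [pySetD_mod _ _ _ (by rw [hlen]; exact hmr), hlen]
        rfl
      have hpg : PySem.List.pyGetD trans (m - 1) [] = doll :: rest := by
        rw [hget, hinvc, hdrop]
      have hstep : stepA (trans, res, ans) m =
          (trans.set (effI cols m).toNat rest, stackStepB (res, ans) (some doll)) := by
        unfold stepA stackStepB
        simp only [hpg, hset]
        cases hL : res.getLast? with
        | none => simp
        | some last =>
          simp only []
          by_cases hld : last = doll
          · rw [if_pos hld, if_pos (by rw [hld])]
          · rw [if_neg hld, if_neg (by simpa using hld)]
      rw [hstep, hsome]
      obtain ⟨r', a'⟩ := stackStepB (res, ans) (some doll)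
      apply ih _ r' a' _ (by simpa using hlen) hmvtail
      intro c hcl
      by_cases hcm : (c : Int) = effI cols m
      · have hcc : c = (effI cols m).toNat := by omega
        subst hcc
        rw [hcm, if_pos rfl,
          List.getD_eq_getElem _ _ (by simpa [hlen] using hclt)]
        simp [hrest]
      · rw [if_neg hcm,
          List.getD_eq_getElem _ _ (by simp [hlen]; omega),
          List.getElem_set_ne (by omega)]
        rw [← List.getD_eq_getElem _ _ (by omega)]
        exact hinv c hcl

theorem picksW_length (board : List (List Int)) (cols : Nat) :
    ∀ (ms : List Int) (cnt : Int → Nat), (picksW board cols cnt ms).length = ms.length := by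
  intro ms
  induction ms with
  | nil => intro cnt; rfl
  | cons m ms ih => intro cnt; simp [picksW, ih]

theorem picksW_getElem (board : List (List Int)) (cols : Nat) :
    ∀ (ms : List Int) (cnt : Int → Nat) (j : Nat), j < ms.length →
      (picksW board cols cnt ms)[j]? =
        some ((colN board (effI cols (ms.getD j 0)))[cnt (effI cols (ms.getD j 0)) +
          (ms.take j).countP (fun x => effI cols x == effI cols (ms.getD j 0))]?) := by
  intro ms
  induction ms with
  | nil => intro cnt j hj; simp at hj
  | cons m ms ih =>
    intro cnt j hj
    cases j with
    | zero => simp [picksW]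
    | succ j =>
      have hj' : j < ms.length := by simpa using hj
      simp only [picksW, List.getElem?_cons_succ, List.getD_cons_succ, List.take_succ_cons]
      rw [ih _ j hj']
      have hidx : (if effI cols (ms.getD j 0) = effI cols m
            then cnt (effI cols m) + 1 else cnt (effI cols (ms.getD j 0))) +
          (ms.take j).countP (fun x => effI cols x == effI cols (ms.getD j 0)) =
          cnt (effI cols (ms.getD j 0)) +
            ((m :: ms.take j).countP (fun x => effI cols x == effI cols (ms.getD j 0))) := by
        rw [List.countP_cons]
        by_cases hxm : effI cols (ms.getD j 0) = effI cols m
        · rw [hxm]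
          simp only [beq_self_eq_true, if_true]
          omega
        · have hb : (effI cols m == effI cols (ms.getD j 0)) = false := by
            simp only [beq_eq_false_iff_ne, ne_eq]
            exact fun h => hxm h.symm
          rw [if_neg hxm, hb]
          simp
      rw [hidx]

theorem picksW_zero_eq_specPicks (board : List (List Int)) (cols : Nat) (moves : List Int) :
    picksW board cols (fun _ => 0) moves = specPicks board cols moves := by
  apply List.ext_getElem?
  intro j
  by_cases hj : j < moves.length
  · rw [picksW_getElem board cols moves _ j hj]
    have hm : moves[j]? = some (moves.getD j 0) := by
      rw [List.getD_eq_getElem _ _ hj, List.getElem?_eq_getElem hj]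
    simp only [specPicks, List.getElem?_map, List.getElem?_range hj, Option.map_some,
      targetAt, hm, Nat.zero_add]
  · rw [List.getElem?_eq_none (by rw [picksW_length]; omega),
      List.getElem?_eq_none (by simp [specPicks]; omega)]

-- ---- B side ----

-- positions (enumerate indices) of the moves addressing effective column c
def posList (cols : Nat) (moves : List Int) (s : Int) (c : Int) : List Int :=
  ((PySem.List.enumerate moves s).filter (fun jm => effI cols jm.2 == c)).map (·.1)

-- what Source B's grouping loop leaves in positions[c]
theorem posfold (cols : Nat) :
    ∀ (l : List (Int × Int)) (ps : List (List Int)),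
      ps.length = cols →
      (∀ p ∈ l, PySem.Raise.InRange cols (p.2 - 1)) →
      ∀ c : Nat, c < cols →
        ((l.foldl (fun ps jm =>
            PySem.List.pySetD ps (jm.2 - 1) (PySem.List.pyGetD ps (jm.2 - 1) [] ++ [jm.1])) ps).getD c []) =
          ps.getD c [] ++ (l.filter (fun jm => effI cols jm.2 == (c : Int))).map (·.1) := by
  intro l
  induction l with
  | nil => intro ps _ _ c _; simp
  | cons p l ih =>
    intro ps hlen hmv c hc
    obtain ⟨j, m⟩ := p
    have hmr : PySem.Raise.InRange cols (m - 1) := hmv (j, m) List.mem_cons_self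
    have hcols0 : 0 < cols := by obtain ⟨h1, h2⟩ := hmr; omega
    have he0 : 0 ≤ effI cols m := PySem.Int.mod_nonneg _ (by exact_mod_cast hcols0)
    have helt : effI cols m < (cols : Int) := PySem.Int.mod_lt _ (by exact_mod_cast hcols0)
    have hclt : (effI cols m).toNat < cols := by omega
    have hget : PySem.List.pyGetD ps (m - 1) [] = ps.getD (effI cols m).toNat [] := by
      rw [pyGetD_mod _ _ _ (by rw [hlen]; exact hmr), hlen]
      rfl
    have hset : PySem.List.pySetD ps (m - 1) (PySem.List.pyGetD ps (m - 1) [] ++ [j]) =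
        ps.set (effI cols m).toNat (ps.getD (effI cols m).toNat [] ++ [j]) := by
      rw [pySetD_mod _ _ _ (by rw [hlen]; exact hmr), hlen, hget]
      rfl
    simp only [List.foldl_cons, hset, List.filter_cons]
    rw [ih _ (by simpa using hlen) (fun q hq => hmv q (List.mem_cons_of_mem _ hq)) c hc]
    by_cases hcm : effI cols m = (c : Int)
    · have hcc : (effI cols m).toNat = c := by omega
      have hbeq : (effI cols m == (c : Int)) = true := by simp [hcm]
      rw [hbeq]
      simp only [if_true, List.map_cons]
      rw [List.getD_eq_getElem _ _ (by simpa [hlen] using hc), hcc, List.getElem_set_self]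
      simp
    · have hbeq : (effI cols m == (c : Int)) = false := by simp [hcm]
      rw [hbeq]
      simp only [Bool.false_eq_true, if_false]
      rw [List.getD_eq_getElem _ _ (by simpa [hlen] using hc),
        List.getElem_set_ne (by omega), ← List.getD_eq_getElem ps [] (by omega)]

theorem find_zip_pos (cols : Nat) :
    ∀ (ms : List Int) (s : Int) (c : Int) (col : List Int) (j : Int),
      ((posList cols ms s c).zip col).find? (fun p => p.1 == j) =
        (if s ≤ j ∧ (ms[(j - s).toNat]?.map (effI cols)) = some c then
          (col[(ms.take (j - s).toNat).countP (fun x => effI cols x == c)]?).map (fun v => (j, v))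
        else none) := by
  intro ms
  induction ms with
  | nil =>
    intro s c col j
    simp [posList, PySem.List.enumerate_nil]
  | cons m ms ih =>
    intro s c col j
    rw [posList, PySem.List.enumerate_cons]
    by_cases hmc : effI cols m = c
    · rw [List.filter_cons_of_pos (by simp [hmc])]
      simp only [List.map_cons]
      cases col with
      | nil =>
        rw [List.zip_nil_right, List.find?_nil]
        split <;> simp
      | cons v col' =>
        rw [List.zip_cons_cons]
        by_cases hjs : j = s
        · rw [List.find?_cons_of_pos (by simp [hjs])]
          have h0 : (j - s).toNat = 0 := by omega
          rw [if_pos ⟨by omega, by rw [h0]; simp [hmc]⟩, h0]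
          simp [hjs]
        · rw [List.find?_cons_of_neg (by simp; omega)]
          rw [show (((PySem.List.enumerate ms (s + 1)).filter
                (fun jm => effI cols jm.2 == c)).map (·.1))
              = posList cols ms (s + 1) c from rfl, ih (s + 1) c col' j]
          by_cases hle : s + 1 ≤ j
          · have h1 : (j - s).toNat = (j - (s + 1)).toNat + 1 := by omega
            rw [h1]
            have hbeq : (effI cols m == c) = true := by simp [hmc]
            simp only [List.getElem?_cons_succ, List.take_succ_cons, List.countP_cons, hbeq,
              if_true]
            by_cases hc2 : (ms[(j - (s + 1)).toNat]?.map (effI cols)) = some c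
            · rw [if_pos ⟨hle, hc2⟩, if_pos ⟨by omega, hc2⟩]
            · rw [if_neg (by tauto), if_neg (by tauto)]
          · rw [if_neg (by omega), if_neg (by omega)]
    · rw [List.filter_cons_of_neg (by simpa using hmc)]
      rw [show (((PySem.List.enumerate ms (s + 1)).filter
            (fun jm => effI cols jm.2 == c)).map (·.1))
          = posList cols ms (s + 1) c from rfl, ih (s + 1) c col j]
      by_cases hjs : j = s
      · rw [if_neg (by omega), if_neg (by
          intro hcon
          rw [show (j - s).toNat = 0 by omega] at hcon
          simp at hcon
          exact hmc hcon.2)]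
      · by_cases hle : s + 1 ≤ j
        · have h1 : (j - s).toNat = (j - (s + 1)).toNat + 1 := by omega
          rw [h1]
          have hbeq : (effI cols m == c) = false := by simp [hmc]
          simp only [List.getElem?_cons_succ, List.take_succ_cons, List.countP_cons, hbeq,
            Bool.false_eq_true, if_false, Nat.add_zero]
          by_cases hc2 : (ms[(j - (s + 1)).toNat]?.map (effI cols)) = some c
          · rw [if_pos ⟨hle, hc2⟩, if_pos ⟨by omega, hc2⟩]
          · rw [if_neg (by tauto), if_neg (by tauto)]
        · rw [if_neg (by omega), if_neg (by omega)]

theorem scatter_length :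
    ∀ (pairs : List (Int × Int)) (pk : List (Option Int)),
      (pairs.foldl (fun pk jd => PySem.List.pySetD pk jd.1 (some jd.2)) pk).length = pk.length := by
  intro pairs
  induction pairs with
  | nil => intro pk; rfl
  | cons p rest ih =>
    intro pk
    simp only [List.foldl_cons]
    rw [ih, PySem.List.length_pySetD]

theorem scatter_get :
    ∀ (pairs : List (Int × Int)) (pk : List (Option Int)),
      (pairs.map (·.1)).Nodup →
      (∀ p ∈ pairs, 0 ≤ p.1 ∧ p.1.toNat < pk.length) →
      ∀ j : Nat,
        (pairs.foldl (fun pk jd => PySem.List.pySetD pk jd.1 (some jd.2)) pk)[j]? =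
          (match pairs.find? (fun p => p.1 == (j : Int)) with
          | some p => if j < pk.length then some (some p.2) else none
          | none => pk[j]?) := by
  intro pairs
  induction pairs with
  | nil => intro pk _ _ j; simp
  | cons p rest ih =>
    intro pk hnd hrange j
    obtain ⟨i, v⟩ := p
    obtain ⟨hi0, hilt⟩ := hrange (i, v) List.mem_cons_self
    obtain ⟨hni, hndr⟩ : (∀ x : Int, (i, x) ∉ rest) ∧ (rest.map (·.1)).Nodup := by
      simpa using hnd
    simp only [List.foldl_cons]
    have hset : PySem.List.pySetD pk i (some v) = pk.set i.toNat (some v) :=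
      PySem.List.pySetD_of_nonneg _ _ hi0
    rw [hset]
    have hrange' : ∀ q ∈ rest, 0 ≤ q.1 ∧ q.1.toNat < (pk.set i.toNat (some v)).length := by
      intro q hq
      have := hrange q (List.mem_cons_of_mem _ hq)
      simpa using this
    rw [ih _ hndr hrange' j]
    by_cases hij : i = (j : Int)
    · rw [List.find?_cons_of_pos (by simp [hij])]
      have hjn : i.toNat = j := by omega
      have hnone : rest.find? (fun p => p.1 == (j : Int)) = none := by
        rw [List.find?_eq_none]
        intro x hx
        simp only [beq_iff_eq]
        intro hx1
        obtain ⟨a, b⟩ := x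
        have ha : a = i := by simp at hx1; omega
        exact hni b (by rwa [ha] at hx)
      rw [hnone]
      show (pk.set i.toNat (some v))[j]? = if j < pk.length then some (some v) else none
      rw [if_pos (by omega), ← hjn, List.getElem?_set_self (by omega)]
    · rw [List.find?_cons_of_neg (by simp [hij])]
      have hij' : i.toNat ≠ j := by omega
      cases hfind : rest.find? (fun p => p.1 == (j : Int)) with
      | some q => simp
      | none => simp [List.getElem?_set_ne hij']

-- (posList).Pairwise (<), hence Nodup of the zipped firsts
theorem posList_pairwise (cols : Nat) (moves : List Int) (s : Int) (c : Int) :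
    (posList cols moves s c).Pairwise (· < ·) := by
  unfold posList
  rw [List.pairwise_map]
  exact (PySem.List.pairwise_lt_enumerate moves s).filter _

theorem posList_mem (cols : Nat) (moves : List Int) (s : Int) (c : Int) (x : Int) :
    x ∈ posList cols moves s c → s ≤ x ∧ x - s < moves.length := by
  intro hx
  unfold posList at hx
  obtain ⟨⟨j, m⟩, hjm, hj⟩ := List.mem_map.mp hx
  have hmem := (List.mem_filter.mp hjm).1
  obtain ⟨k, hk, hkeq⟩ := (PySem.List.mem_enumerate_iff _ _ _).mp hmem
  subst hj
  rw [hkeq]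
  constructor <;> simp <;> omega

theorem zip_map_fst (l : List Int) (col : List Int) :
    ((l.zip col).map (·.1)) = l.take col.length := by
  induction l generalizing col with
  | nil => simp
  | cons a l ih =>
    cases col with
    | nil => simp
    | cons v col' => simp [ih]

theorem outer_length (board : List (List Int)) (g : Int → List Int) :
    ∀ (cs : List Int) (pk : List (Option Int)),
      (cs.foldl (fun pk c => ((g c).zip (colN board c)).foldl
        (fun pk jd => PySem.List.pySetD pk jd.1 (some jd.2)) pk) pk).length = pk.length := by
  intro cs
  induction cs with
  | nil => intro pk; rfl
  | cons c cs ih =>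
    intro pk
    simp only [List.foldl_cons]
    rw [ih, scatter_length]

theorem outer_fold (board : List (List Int)) (cols : Nat) (moves : List Int) :
    ∀ (cs : List Int) (pk : List (Option Int)),
      cs.Nodup →
      pk.length = moves.length →
      (∀ (j : Nat) (m : Int), moves[j]? = some m →
        pk[j]? = some (if effI cols m ∈ cs then none else targetAt board cols moves j)) →
      (∀ (j : Nat) (m : Int), moves[j]? = some m →
        (cs.foldl (fun pk c => ((posList cols moves 0 c).zip (colN board c)).foldl
          (fun pk jd => PySem.List.pySetD pk jd.1 (some jd.2)) pk) pk)[j]? =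
          some (targetAt board cols moves j)) := by
  intro cs
  induction cs with
  | nil =>
    intro pk _ _ hpk j m hm
    simpa using hpk j m hm
  | cons ccur cs ih =>
    intro pk hnd hlen hpk j m hm
    have hnd' := List.nodup_cons.mp hnd
    simp only [List.foldl_cons]
    set pairs := (posList cols moves 0 ccur).zip (colN board ccur) with hpairs
    have hndp : (pairs.map (·.1)).Nodup := by
      rw [hpairs, zip_map_fst]
      exact ((posList_pairwise cols moves 0 ccur).imp (fun h => ne_of_lt h)).sublist
        (List.take_sublist _ _)
    have hrange : ∀ p ∈ pairs, 0 ≤ p.1 ∧ p.1.toNat < pk.length := by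
      intro p hp
      have hp1 := (List.of_mem_zip hp).1
      have := posList_mem cols moves 0 ccur p.1 hp1
      constructor
      · omega
      · omega
    refine ih _ hnd'.2 (by rw [scatter_length, hlen]) ?_ j m hm
    intro j' m' hm'
    have hj'lt : j' < moves.length := by
      by_contra hcon
      rw [List.getElem?_eq_none (by omega)] at hm'
      cases hm'
    rw [scatter_get pairs pk hndp hrange j']
    rw [hpairs, find_zip_pos cols moves 0 ccur (colN board ccur) (j' : Int)]
    by_cases hmc : effI cols m' = ccur
    · have hcond : (0 : Int) ≤ (j' : Int) ∧
          (moves[((j' : Int) - 0).toNat]?.map (effI cols)) = some ccur := by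
        constructor
        · omega
        · rw [show (((j' : Int) - 0).toNat) = j' by omega, hm']
          simp [hmc]
      rw [if_pos hcond]
      have htarget : targetAt board cols moves j' =
          (colN board ccur)[(moves.take j').countP (fun x => effI cols x == ccur)]? := by
        unfold targetAt
        rw [hm', ← hmc]
      cases hcol : (colN board ccur)[(moves.take ((j' : Int) - 0).toNat).countP
          (fun x => effI cols x == ccur)]? with
      | some v =>
        simp only [Option.map_some]
        rw [if_pos (by omega)]
        rw [htarget]
        rw [show (((j' : Int) - 0).toNat) = j' by omega] at hcol
        rw [hcol]
        simp [hmc, hnd'.1]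
      | none =>
        simp only [Option.map_none]
        rw [hpk j' m' hm']
        rw [show (((j' : Int) - 0).toNat) = j' by omega] at hcol
        rw [htarget, hcol]
        simp [hmc]
    · rw [if_neg (by
        intro hcon
        rw [show (((j' : Int) - 0).toNat) = j' by omega, hm'] at hcon
        simp at hcon
        exact hmc hcon)]
      rw [hpk j' m' hm']
      simp [hmc]

-- ===== VERDICT (by name: the statement is the Claim_ definition above) =====
theorem solution_spec : Claim_equal_solution := by
  intro board moves _ hpre
  obtain ⟨hne, hrows, hmv⟩ := hpre
  have hhead : PySem.List.pyGetD board 0 [] = board.headD [] := by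
    cases board with
    | nil => exact absurd rfl hne
    | cons r rs => exact PySem.List.pyGetD_zero_cons r rs []
  unfold Spec_solution
  -- A side: the fold over moves is the stack scan of specPicks
  have hA : solution board moves =
      ((picksW board (board.headD []).length (fun _ => 0) moves).foldl stackStepB ([], 0)).2 := by
    have h0 : solution board moves = (moves.foldl stepA
        (((List.range (PySem.List.pyGetD board 0 []).length).map (fun (i : Nat) =>
          board.filterMap (fun row =>
            let v := PySem.List.pyGetD row (i : Int) 0
            if v ≠ 0 then some v else none))), ([] : List Int), (0 : Int))).2.2 := rfl
    rw [h0]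
    simp only [hhead]
    have hinv0 : ∀ c : Nat, c < (board.headD []).length →
        (((List.range (board.headD []).length).map (fun (i : Nat) =>
          board.filterMap (fun row =>
            let v := PySem.List.pyGetD row (i : Int) 0
            if v ≠ 0 then some v else none))).getD c []) =
        (colN board (c : Int)).drop ((fun _ => (0 : Nat)) ((c : Int))) := by
      intro c hc
      rw [List.getD_eq_getElem _ _ (by simpa using hc)]
      simp only [List.getElem_map, List.getElem_range, List.drop_zero]
      rfl
    rw [A_fold board (board.headD []).length moves _ [] 0 (fun _ => 0) (by simp) hmv hinv0]
  -- B side: the scattered picks array IS specPicks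
  have hB : solution_alt board moves =
      ((specPicks board (board.headD []).length moves).foldl stackStepB ([], 0)).2 := by
    have h0 : solution_alt board moves =
        (((PySem.List.pyRange 0 ((PySem.List.pyGetD board 0 []).length : Int) 1).foldl
          (fun pk c =>
            ((PySem.List.pyGetD
                ((PySem.List.enumerate moves 0).foldl
                  (fun ps jm => PySem.List.pySetD ps (jm.2 - 1)
                    (PySem.List.pyGetD ps (jm.2 - 1) [] ++ [jm.1]))
                  ((List.range (PySem.List.pyGetD board 0 []).length).map (fun _ => [])))
                c []).zip (colN board c)).foldl
              (fun pk jd => PySem.List.pySetD pk jd.1 (some jd.2)) pk)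
          (List.replicate moves.length (none : Option Int))).foldl stackStepB ([], 0)).2 := rfl
    rw [h0]
    simp only [hhead]
    have hmvpairs : ∀ p ∈ PySem.List.enumerate moves 0,
        PySem.Raise.InRange (board.headD []).length (p.2 - 1) := by
      intro p hp
      obtain ⟨k, hk, hkeq⟩ := (PySem.List.mem_enumerate_iff _ _ _).mp hp
      exact hmv _ (by rw [hkeq]; exact List.getElem_mem hk)
    have hposE : ∀ c : Int, 0 ≤ c → c < ((board.headD []).length : Int) →
        PySem.List.pyGetD
          ((PySem.List.enumerate moves 0).foldl
            (fun ps jm => PySem.List.pySetD ps (jm.2 - 1)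
              (PySem.List.pyGetD ps (jm.2 - 1) [] ++ [jm.1]))
            ((List.range (board.headD []).length).map (fun _ => [])))
          c [] = posList (board.headD []).length moves 0 c := by
      intro c hc0 hclt
      rw [PySem.List.pyGetD_of_nonneg _ _ hc0]
      rw [posfold (board.headD []).length (PySem.List.enumerate moves 0) _ (by simp)
        hmvpairs c.toNat (by omega)]
      rw [List.getD_eq_getElem _ _ (by simpa using (show c.toNat < (board.headD []).length by omega))]
      simp only [List.getElem_map, List.getElem_range, List.nil_append]
      rw [show ((c.toNat : Nat) : Int) = c by omega]
      rfl
    have hfun : (PySem.List.pyRange 0 ((board.headD []).length : Int) 1).foldl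
          (fun pk c =>
            ((PySem.List.pyGetD
                ((PySem.List.enumerate moves 0).foldl
                  (fun ps jm => PySem.List.pySetD ps (jm.2 - 1)
                    (PySem.List.pyGetD ps (jm.2 - 1) [] ++ [jm.1]))
                  ((List.range (board.headD []).length).map (fun _ => [])))
                c []).zip (colN board c)).foldl
              (fun pk jd => PySem.List.pySetD pk jd.1 (some jd.2)) pk)
          (List.replicate moves.length (none : Option Int)) =
        (PySem.List.pyRange 0 ((board.headD []).length : Int) 1).foldl
          (fun pk c => ((posList (board.headD []).length moves 0 c).zip (colN board c)).foldl
            (fun pk jd => PySem.List.pySetD pk jd.1 (some jd.2)) pk)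
          (List.replicate moves.length (none : Option Int)) := by
      apply PySem.List.foldl_congr_mem
      intro pk c hc
      obtain ⟨hc0, hclt⟩ := PySem.List.mem_pyRange_one.mp hc
      rw [hposE c hc0 hclt]
    rw [hfun]
    have hpicks : (PySem.List.pyRange 0 ((board.headD []).length : Int) 1).foldl
        (fun pk c => ((posList (board.headD []).length moves 0 c).zip (colN board c)).foldl
          (fun pk jd => PySem.List.pySetD pk jd.1 (some jd.2)) pk)
        (List.replicate moves.length (none : Option Int)) =
        specPicks board (board.headD []).length moves := by
      have hinit : ∀ (j : Nat) (m : Int), moves[j]? = some m →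
          (List.replicate moves.length (none : Option Int))[j]? =
            some (if effI (board.headD []).length m ∈
                PySem.List.pyRange 0 ((board.headD []).length : Int) 1
              then none else targetAt board (board.headD []).length moves j) := by
        intro j m hm
        have hj : j < moves.length := by
          by_contra hcon
          rw [List.getElem?_eq_none (by omega)] at hm
          cases hm
        have hmm : m ∈ moves := List.mem_of_getElem? hm
        have hmr := hmv m hmm
        have hcols0 : 0 < (board.headD []).length := by obtain ⟨h1, h2⟩ := hmr; omega
        have hmem : effI (board.headD []).length m ∈
            PySem.List.pyRange 0 ((board.headD []).length : Int) 1 :=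
          PySem.List.mem_pyRange_one.mpr
            ⟨PySem.Int.mod_nonneg _ (by exact_mod_cast hcols0),
             PySem.Int.mod_lt _ (by exact_mod_cast hcols0)⟩
        rw [List.getElem?_replicate, if_pos hj, if_pos hmem]
      apply List.ext_getElem?
      intro j
      by_cases hj : j < moves.length
      · have hm : moves[j]? = some (moves.getD j 0) := by
          rw [List.getD_eq_getElem _ _ hj, List.getElem?_eq_getElem hj]
        rw [outer_fold board (board.headD []).length moves _ _
          (PySem.List.nodup_pyRange_one _ _) (by simp) hinit j _ hm]
        simp [specPicks, List.getElem?_map, List.getElem?_range hj]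
      · rw [List.getElem?_eq_none (by rw [outer_length]; simp; omega),
          List.getElem?_eq_none (by simp [specPicks]; omega)]
    rw [hpicks]
  rw [hA, hB, picksW_zero_eq_specPicks]
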